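-- pv_equiv track=rewrite | github.com/krudny/Algorithms-and-Data-Structures | BITAlgo Tasks/BITALGO1/zad2.py | counting_sort_by_length
-- ===== SOURCE A (Python) =====
-- def counting_sort_by_length(A, max_len):
--     n = len(A)
--     count = [0] * max_len
--     output = [0] * n
--
--     for i in range(n):
--         length = len(A[i])
--         count[length] += 1
--
--     for i in range(1, len(count)):
--         count[i] = count[i] + count[i-1]
--
--     for i in range(n-1, -1, -1):
--         count[len(A[i])] -= 1
--         output[count[len(A[i])]] = A[i]
--
--     return output
-- ===== SOURCE B (Python) =====
-- def counting_sort_by_length(A, max_len):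
--     buckets = [[] for _ in range(max_len)]
--     for s in A:
--         buckets[len(s)].append(s)
--     output = []
--     for b in buckets:
--         output += b
--     return output
-- ===== Notes on version B (the rewrite author's own statement) =====
-- stated objective: simpler
-- what changed: Replaces the count array, prefix-sum pass and reverse placement pass with per-length bucket lists filled in one forward pass and concatenated in order.
import Mathlib
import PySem

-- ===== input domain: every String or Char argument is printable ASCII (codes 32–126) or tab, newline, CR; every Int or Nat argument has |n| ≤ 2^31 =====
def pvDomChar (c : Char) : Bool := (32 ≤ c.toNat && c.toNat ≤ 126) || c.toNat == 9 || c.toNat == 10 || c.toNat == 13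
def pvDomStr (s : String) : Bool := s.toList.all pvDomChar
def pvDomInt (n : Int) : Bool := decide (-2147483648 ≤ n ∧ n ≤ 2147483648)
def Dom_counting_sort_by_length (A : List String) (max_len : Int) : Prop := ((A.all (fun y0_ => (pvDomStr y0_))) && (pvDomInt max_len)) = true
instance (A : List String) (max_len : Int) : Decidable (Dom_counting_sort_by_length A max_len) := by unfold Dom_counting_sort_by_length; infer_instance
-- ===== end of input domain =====

-- B replaces the count/prefix-sum/reverse-placement passes with per-length buckets
-- filled in one forward pass and concatenated; return values agree on Pre_.

-- ===== PORT A =====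
-- Port of A.  `[0] * n` holds ints later overwritten by strings; we use "" as the
-- placeholder — under Pre_ every slot is overwritten, so it never survives.
-- `range(1, len(count))` is ported as List.range' 1 (count.size - 1) (exact for len ≥ 0).
-- Python lists are O(1) arrays, so the port uses Array (setIfInBounds/getD: an
-- out-of-range index raises IndexError in Python; those inputs are outside Pre_).
def counting_sort_by_length (A : List String) (max_len : Int) : List String :=
  let n := A.length
  let count := Array.replicate max_len.toNat (0 : Int)
  let output := Array.replicate n ""
  let count := A.foldl (fun c s => c.setIfInBounds s.length (c.getD s.length 0 + 1)) count
  let count := (List.range' 1 (count.size - 1)).foldl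
      (fun c i => c.setIfInBounds i (c.getD i 0 + c.getD (i - 1) 0)) count
  let res := (A.reverse).foldl
      (fun (st : Array Int × Array String) s =>
        let c := st.1.setIfInBounds s.length (st.1.getD s.length 0 - 1)
        (c, st.2.setIfInBounds (c.getD s.length 0).toNat s)) (count, output)
  res.2.toList

-- ===== PORT B =====
def counting_sort_by_length_alt (A : List String) (max_len : Int) : List String :=
  let buckets := List.replicate max_len.toNat ([] : List String)
  let buckets := A.foldl (fun b s => b.set s.length (b.getD s.length [] ++ [s])) buckets
  buckets.foldl (fun out b => out ++ b) []

-- ===== PRECONDITION & SPEC =====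
-- Pre_ excludes exactly the inputs where Python A raises IndexError:
-- some string has len(s) >= max_len (count[len(s)] out of range).
def Pre_counting_sort_by_length (A : List String) (max_len : Int) : Prop :=
  ∀ s ∈ A, (s.length : Int) < max_len
instance (A : List String) (max_len : Int) : Decidable (Pre_counting_sort_by_length A max_len) := by
  unfold Pre_counting_sort_by_length; infer_instance

def pvWitness_counting_sort_by_length : List String × Int := (["ab", "", "c", "xy"], 4)

def Spec_counting_sort_by_length (A : List String) (max_len : Int) (out : List String) : Prop := out = counting_sort_by_length_alt A max_len
instance (A : List String) (max_len : Int) (out : List String) : Decidable (Spec_counting_sort_by_length A max_len out) := by unfold Spec_counting_sort_by_length; infer_instance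

-- ===== CLAIM (what is proved, stated in full; the proofs are below) =====
def Claim_equal_counting_sort_by_length : Prop := ∀ (A : List String) (max_len : Int), Dom_counting_sort_by_length A max_len → Pre_counting_sort_by_length A max_len → Spec_counting_sort_by_length A max_len (counting_sort_by_length A max_len)

-- ===== LEMMAS AND PROOFS =====

def bucket (A : List String) (j : Nat) : List String := A.filter (fun s => s.length == j)

def cntEq (A : List String) (j : Nat) : Nat := (bucket A j).length

def cum (A : List String) : Nat → Nat
  | 0 => 0
  | j + 1 => cum A j + cntEq A j

def writeAt : List String → Nat → List String → List String
  | out, _, [] => out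
  | out, p, w :: ws => (writeAt out (p + 1) ws).set p w

def writesFor (cnt : List Int) (B : List String) (js : List Nat) (out : List String) : List String :=
  js.foldr (fun j acc => writeAt acc (cnt.getD j 0 - (cntEq B j : Int)).toNat (bucket B j)) out

def chainWrite : List (List String) → Nat → List String → List String
  | [], _, out => out
  | ws :: rest, p, out => writeAt (chainWrite rest (p + ws.length) out) p ws

theorem bucket_cons (s : String) (B : List String) (j : Nat) :
    bucket (s :: B) j = if s.length = j then s :: bucket B j else bucket B j := by
  simp only [bucket, List.filter_cons]; split_ifs with h <;> simp_all

theorem cntEq_cons (s : String) (B : List String) (j : Nat) :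
    cntEq (s :: B) j = (if s.length = j then 1 else 0) + cntEq B j := by
  simp [cntEq, bucket_cons]; split_ifs <;> simp [Nat.add_comm]

theorem cntEq_le (s : String) (B : List String) (j : Nat) : cntEq B j ≤ cntEq (s :: B) j := by
  rw [cntEq_cons]; omega

theorem cntEq_nil (j : Nat) : cntEq [] j = 0 := rfl

theorem getD_set_self2 {α : Type} (l : List α) (i : Nat) (v d : α) (h : i < l.length) :
    (l.set i v).getD i d = v := by
  simp [List.getD_eq_getElem?_getD, h]

theorem getD_set_ne2 {α : Type} (l : List α) (i j : Nat) (v d : α) (h : i ≠ j) :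
    (l.set i v).getD j d = l.getD j d := by
  simp [List.getD_eq_getElem?_getD, List.getElem?_set_ne h]

theorem getD_set_self (l : List Int) (i : Nat) (v : Int) (h : i < l.length) :
    (l.set i v).getD i 0 = v := by
  simp [List.getD_eq_getElem?_getD, h]

theorem getD_set_ne (l : List Int) (i j : Nat) (v : Int) (h : i ≠ j) :
    (l.set i v).getD j 0 = l.getD j 0 := by
  simp [List.getD_eq_getElem?_getD, List.getElem?_set_ne h]

theorem set_writeAt_comm (ws : List String) : ∀ (out : List String) (p q : Nat) (v : String),
    (q < p ∨ p + ws.length ≤ q) →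
    writeAt (out.set q v) p ws = (writeAt out p ws).set q v := by
  induction ws with
  | nil => intro out p q v _; rfl
  | cons w ws ih =>
      intro out p q v h
      simp only [writeAt]
      have h2 : q < p + 1 ∨ (p + 1) + ws.length ≤ q := by simp at h; omega
      have hqp : q ≠ p := by
        cases h with
        | inl h => omega
        | inr h => simp at h; omega
      rw [ih out (p+1) q v h2]
      exact List.set_comm _ _ hqp

-- ===== loop 1 (counting pass) =====
theorem loop1_spec (B : List String) : ∀ (c : List Int),
    (∀ s ∈ B, s.length < c.length) →
    (B.foldl (fun c s => c.set s.length (c.getD s.length 0 + 1)) c).length = c.length ∧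
    ∀ j < c.length,
      (B.foldl (fun c s => c.set s.length (c.getD s.length 0 + 1)) c).getD j 0
        = c.getD j 0 + (cntEq B j : Int) := by
  induction B with
  | nil => intro c _; simp [cntEq_nil]
  | cons s B ih =>
      intro c hc
      have hl : s.length < c.length := hc s (by simp)
      have hlen : (c.set s.length (c.getD s.length 0 + 1)).length = c.length := by simp
      obtain ⟨ih1, ih2⟩ := ih (c.set s.length (c.getD s.length 0 + 1))
        (by intro t ht; rw [hlen]; exact hc t (by simp [ht]))
      constructor
      · simpa [List.foldl_cons, hlen] using ih1
      · intro j hj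
        rw [List.foldl_cons, ih2 j (by omega), cntEq_cons]
        by_cases hje : s.length = j
        · subst hje; rw [getD_set_self _ _ _ hl]; simp; ring
        · rw [getD_set_ne _ _ _ _ hje]; simp [hje]

-- ===== loop 2 (prefix sums) =====
theorem loop2_spec (A : List String) (k : Nat) : ∀ (a : Nat) (c : List Int), 1 ≤ a → a + k = c.length →
    (∀ j < a, c.getD j 0 = (cum A (j+1) : Int)) →
    (∀ j, a ≤ j → j < c.length → c.getD j 0 = (cntEq A j : Int)) →
    ((List.range' a k).foldl (fun c i => c.set i (c.getD i 0 + c.getD (i - 1) 0)) c).length = c.length ∧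
    ∀ j < c.length,
      ((List.range' a k).foldl (fun c i => c.set i (c.getD i 0 + c.getD (i - 1) 0)) c).getD j 0
        = (cum A (j+1) : Int) := by
  induction k with
  | zero =>
      intro a c h1 hak hlo _hhi
      simp only [List.range'_zero, List.foldl_nil]
      constructor
      · trivial
      · intro j hj; exact hlo j (by omega)
  | succ k ih =>
      intro a c h1 hak hlo hhi
      have ha : a < c.length := by omega
      have hval : (c.set a (c.getD a 0 + c.getD (a - 1) 0)).getD a 0 = (cum A (a+1) : Int) := by
        rw [getD_set_self _ _ _ ha, hhi a le_rfl ha, hlo (a-1) (by omega)]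
        have : a - 1 + 1 = a := by omega
        rw [this, cum]; push_cast; ring
      have hlen : (c.set a (c.getD a 0 + c.getD (a - 1) 0)).length = c.length := by simp
      obtain ⟨ih1, ih2⟩ := ih (a+1) (c.set a (c.getD a 0 + c.getD (a - 1) 0))
        (by omega) (by omega)
        (by
          intro j hj
          by_cases hja : j = a
          · subst hja; exact hval
          · rw [getD_set_ne _ _ _ _ (by omega)]; exact hlo j (by omega))
        (by
          intro j hj hj2
          rw [getD_set_ne _ _ _ _ (by omega)]
          exact hhi j (by omega) (by omega))
      rw [List.range'_succ, List.foldl_cons]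
      exact ⟨by rw [ih1, hlen], fun j hj => ih2 j (by omega)⟩

-- ===== loop 3 (placement) =====
theorem writesFor_congr (cnt : List Int) (B B' : List String) : ∀ (js : List Nat) (out : List String),
    (∀ j ∈ js, cntEq B j = cntEq B' j ∧ bucket B j = bucket B' j) →
    writesFor cnt B js out = writesFor cnt B' js out := by
  intro js
  induction js with
  | nil => intro out _; rfl
  | cons j js ih =>
      intro out h
      have hj := h j (by simp)
      simp only [writesFor, List.foldr_cons] at *
      rw [ih out (fun t ht => h t (by simp [ht])), hj.1, hj.2]

theorem writesFor_nil (cnt : List Int) : ∀ (js : List Nat) (out : List String),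
    writesFor cnt [] js out = out := by
  intro js
  induction js with
  | nil => intro out; rfl
  | cons j js ih => intro out; simp only [writesFor, List.foldr_cons] at *; rw [ih]; rfl

theorem writesFor_cons_set (cnt : List Int) (s : String) (B' : List String) :
    ∀ (js : List Nat) (out : List String),
    js.Nodup → s.length ∈ js →
    (∀ j ∈ js, (cntEq (s :: B') j : Int) ≤ cnt.getD j 0) →
    (∀ j ∈ js, ∀ k ∈ js, j < k → cnt.getD j 0 ≤ cnt.getD k 0 - (cntEq (s :: B') k : Int)) →
    writesFor cnt (s :: B') js out
      = (writesFor cnt B' js out).set (cnt.getD s.length 0 - (cntEq (s :: B') s.length : Int)).toNat s := by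
  intro js
  induction js with
  | nil => intro out _ hmem _ _; simp at hmem
  | cons j rest ih =>
      intro out hnd hmem hle hdisj
      rw [List.nodup_cons] at hnd
      have hle_l : (cntEq (s :: B') s.length : Int) ≤ cnt.getD s.length 0 := hle s.length hmem
      have hcl : cntEq (s :: B') s.length = 1 + cntEq B' s.length := by
        rw [cntEq_cons]; simp
      by_cases hj : j = s.length
      · subst hj
        have hcongr : writesFor cnt (s :: B') rest out = writesFor cnt B' rest out := by
          apply writesFor_congr
          intro t ht
          have hne : ¬ (s.length = t) := fun he => hnd.1 (he ▸ ht)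
          exact ⟨by rw [cntEq_cons]; simp [hne], by rw [bucket_cons]; simp [hne]⟩
        simp only [writesFor, List.foldr_cons] at hcongr ⊢
        rw [hcongr, bucket_cons, if_pos rfl, writeAt]
        have harith : (cnt.getD s.length 0 - (cntEq (s :: B') s.length : Int)).toNat + 1
            = (cnt.getD s.length 0 - (cntEq B' s.length : Int)).toNat := by omega
        rw [harith]
      · have hlmem : s.length ∈ rest := by
          rcases List.mem_cons.mp hmem with he | hm
          · exact absurd he.symm hj
          · exact hm
        have hih := ih out hnd.2 hlmem
          (fun t ht => hle t (List.mem_cons_of_mem _ ht))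
          (fun a ha b hb hab => hdisj a (List.mem_cons_of_mem _ ha) b (List.mem_cons_of_mem _ hb) hab)
        have hbj : bucket (s :: B') j = bucket B' j := by
          rw [bucket_cons]; simp [Ne.symm hj]
        have hcj : cntEq (s :: B') j = cntEq B' j := by
          rw [cntEq_cons]; simp [Ne.symm hj]
        simp only [writesFor, List.foldr_cons] at hih ⊢
        rw [hih, hbj, hcj]
        apply set_writeAt_comm
        have hlenb : (bucket B' j).length = cntEq B' j := rfl
        have hlej : (cntEq (s :: B') j : Int) ≤ cnt.getD j 0 := hle j (by simp)
        rcases Nat.lt_or_ge j s.length with hcase | hcase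
        · right
          have h1 := hdisj j (by simp) s.length hmem hcase
          rw [hlenb]
          have : (cntEq (s :: B') j : Int) = (cntEq B' j : Int) := by rw [hcj]
          omega
        · have hcase2 : s.length < j := by omega
          left
          have h1 := hdisj s.length hmem j (by simp) hcase2
          have : (cntEq (s :: B') j : Int) = (cntEq B' j : Int) := by rw [hcj]
          omega

def place (st : List Int × List String) (s : String) : List Int × List String :=
  let c := st.1.set s.length (st.1.getD s.length 0 - 1)
  (c, st.2.set (c.getD s.length 0).toNat s)

theorem loop3_spec (cnt : List Int) : ∀ (B : List String) (out : List String),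
    (∀ s ∈ B, s.length < cnt.length) →
    (∀ j < cnt.length, (cntEq B j : Int) ≤ cnt.getD j 0) →
    (∀ j k : Nat, j < k → k < cnt.length → cnt.getD j 0 ≤ cnt.getD k 0 - (cntEq B k : Int)) →
    (B.foldr (fun s st => place st s) (cnt, out)).1.length = cnt.length ∧
    (∀ j < cnt.length, (B.foldr (fun s st => place st s) (cnt, out)).1.getD j 0
        = cnt.getD j 0 - (cntEq B j : Int)) ∧
    (B.foldr (fun s st => place st s) (cnt, out)).2
      = writesFor cnt B (List.range cnt.length) out := by
  intro B
  induction B with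
  | nil =>
      intro out _ _ _
      exact ⟨rfl, fun j _ => by simp [cntEq_nil], (writesFor_nil cnt (List.range cnt.length) out).symm⟩
  | cons s B ih =>
      intro out hlen hle hdisj
      have hsl : s.length < cnt.length := hlen s (by simp)
      have hleB : ∀ j < cnt.length, (cntEq B j : Int) ≤ cnt.getD j 0 := by
        intro j hj
        have := hle j hj
        have h2 := cntEq_le s B j
        omega
      have hdisjB : ∀ j k : Nat, j < k → k < cnt.length → cnt.getD j 0 ≤ cnt.getD k 0 - (cntEq B k : Int) := by
        intro j k hjk hk
        have := hdisj j k hjk hk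
        have h2 := cntEq_le s B k
        omega
      obtain ⟨ih1, ih2, ih3⟩ := ih out (fun t ht => hlen t (by simp [ht])) hleB hdisjB
      simp only [List.foldr_cons]
      set FB := B.foldr (fun s st => place st s) (cnt, out) with hFB
      have hcsl : cntEq (s :: B) s.length = 1 + cntEq B s.length := by rw [cntEq_cons]; simp
      have hslF : s.length < FB.1.length := by rw [ih1]; exact hsl
      have hc1 : (FB.1.set s.length (FB.1.getD s.length 0 - 1)).getD s.length 0
          = cnt.getD s.length 0 - (cntEq (s :: B) s.length : Int) := by
        rw [getD_set_self _ _ _ hslF, ih2 s.length hsl, hcsl]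
        push_cast; ring
      refine ⟨?_, ?_, ?_⟩
      · simp [place, ih1]
      · intro j hj
        by_cases hje : j = s.length
        · subst hje; exact hc1
        · show ((FB.1.set s.length (FB.1.getD s.length 0 - 1)).getD j 0) = _
          rw [getD_set_ne _ _ _ _ (Ne.symm hje), ih2 j hj, cntEq_cons]
          simp [Ne.symm hje]
      · show (FB.2.set (((FB.1.set s.length (FB.1.getD s.length 0 - 1)).getD s.length 0).toNat) s) = _
        rw [hc1, ih3]
        rw [writesFor_cons_set cnt s B (List.range cnt.length) out List.nodup_range
          (List.mem_range.mpr hsl)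
          (fun j hjm => hle j (List.mem_range.mp hjm))
          (fun a ha b hb hab => hdisj a b hab (List.mem_range.mp hb))]

-- ===== writes with cumulative offsets = concatenation =====
theorem set_at_join {α : Type} (w a : α) : ∀ (l1 l2 : List α),
    (l1 ++ a :: l2).set l1.length w = l1 ++ w :: l2 := by
  intro l1
  induction l1 with
  | nil => intro l2; rfl
  | cons x l1 ih => intro l2; simp [ih]

theorem writeAt_eq (ws : List String) : ∀ (out : List String) (p : Nat),
    p + ws.length ≤ out.length →
    writeAt out p ws = out.take p ++ ws ++ out.drop (p + ws.length) := by
  induction ws with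
  | nil => intro out p _; simp [writeAt]
  | cons w ws ih =>
      intro out p h
      simp only [List.length_cons] at h
      have hp : p < out.length := by omega
      have hg : out[p]?.toList = [out[p]] := by
        rw [List.getElem?_eq_getElem hp]; rfl
      have hsplit : out.take (p+1) ++ ws ++ out.drop (p+1+ws.length)
          = out.take p ++ out[p] :: (ws ++ out.drop (p+1+ws.length)) := by
        rw [List.take_succ, hg]; simp only [List.append_assoc, List.cons_append, List.nil_append]
      have hlen1 : (out.take p).length = p := by simp; omega
      have hj := set_at_join w out[p] (out.take p) (ws ++ out.drop (p+1+ws.length))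
      rw [hlen1] at hj
      rw [writeAt, ih out (p+1) (by omega), hsplit, hj]
      simp only [List.cons_append, List.append_assoc, List.length_cons]
      have : p + 1 + ws.length = p + (ws.length + 1) := by omega
      rw [this]

theorem chainWrite_eq : ∀ (segs : List (List String)) (p : Nat) (out : List String),
    p + segs.flatten.length ≤ out.length →
    chainWrite segs p out = out.take p ++ segs.flatten ++ out.drop (p + segs.flatten.length) := by
  intro segs
  induction segs with
  | nil => intro p out _; simp [chainWrite]
  | cons ws rest ih =>
      intro p out h
      simp only [List.flatten_cons, List.length_append] at h
      have hih := ih (p + ws.length) out (by omega)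
      have hlen : (chainWrite rest (p + ws.length) out).length = out.length := by
        rw [hih]; simp only [List.length_append, List.length_take, List.length_drop]; omega
      rw [chainWrite, writeAt_eq ws _ p (by rw [hlen]; omega), hih]
      rw [List.append_assoc (out.take (p + ws.length))]
      have htake : (List.take (p + ws.length) out ++ (rest.flatten ++
          List.drop (p + ws.length + rest.flatten.length) out)).take p = List.take p out := by
        rw [List.take_append_of_le_length (by simp; omega), List.take_take]
        congr 1; omega
      have hdrop : (List.take (p + ws.length) out ++ (rest.flatten ++
          List.drop (p + ws.length + rest.flatten.length) out)).drop (p + ws.length)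
          = rest.flatten ++ List.drop (p + ws.length + rest.flatten.length) out := by
        rw [List.drop_append_of_le_length (by simp; omega)]
        simp
      rw [htake, hdrop]
      simp only [List.flatten_cons, List.length_append, List.append_assoc]
      have : p + ws.length + rest.flatten.length = p + (ws.length + rest.flatten.length) := by omega
      rw [this]

theorem writesFor_range_chain (A : List String) (cnt : List Int) : ∀ (k a : Nat) (out : List String),
    a + k ≤ cnt.length →
    (∀ j < cnt.length, cnt.getD j 0 = (cum A (j+1) : Int)) →
    writesFor cnt A (List.range' a k) out
      = chainWrite ((List.range' a k).map (bucket A)) (cum A a) out := by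
  intro k
  induction k with
  | zero => intro a out _ _; rfl
  | succ k ih =>
      intro a out hak hc
      have ha : a < cnt.length := by omega
      rw [List.range'_succ]
      simp only [writesFor, List.foldr_cons, List.map_cons, chainWrite]
      have hoff : (cnt.getD a 0 - (cntEq A a : Int)).toNat = cum A a := by
        rw [hc a ha]
        have : cum A (a + 1) = cum A a + cntEq A a := rfl
        rw [this]; push_cast; omega
      have hnext : cum A a + (bucket A a).length = cum A (a + 1) := rfl
      rw [hoff]
      have := ih (a + 1) out (by omega) hc
      simp only [writesFor] at this
      rw [this, hnext]

theorem flatten_map_len (A : List String) : ∀ (k a : Nat),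
    (((List.range' a k).map (bucket A)).flatten).length + cum A a = cum A (a + k) := by
  intro k
  induction k with
  | zero => intro a; simp
  | succ k ih =>
      intro a
      rw [List.range'_succ]
      simp only [List.map_cons, List.flatten_cons, List.length_append]
      have h1 := ih (a + 1)
      have h2 : (bucket A a).length = cntEq A a := rfl
      have h3 : cum A (a + 1) = cum A a + cntEq A a := rfl
      rw [show a + (k + 1) = a + 1 + k from by omega]
      omega

theorem countP_split (m : Nat) : ∀ (A : List String),
    A.countP (fun s => decide (s.length < m + 1))
      = A.countP (fun s => decide (s.length < m)) + A.countP (fun s => s.length == m) := by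
  intro A
  induction A with
  | nil => rfl
  | cons s A ih =>
      simp only [List.countP_cons, ih]
      by_cases h0 : s.length < m + 1 <;> by_cases h1 : s.length < m <;> by_cases h2 : s.length = m <;>
        simp [h0, h1, h2] <;> omega

theorem cntEq_countP (A : List String) (j : Nat) :
    cntEq A j = A.countP (fun s => s.length == j) := by
  simp [cntEq, bucket, List.countP_eq_length_filter]

theorem cum_countP (A : List String) : ∀ (m : Nat),
    cum A m = A.countP (fun s => decide (s.length < m)) := by
  intro m
  induction m with
  | zero => simp [cum]
  | succ m ih => rw [cum, ih, countP_split, cntEq_countP]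

theorem cum_all (A : List String) (m : Nat) (h : ∀ s ∈ A, s.length < m) :
    cum A m = A.length := by
  rw [cum_countP, List.countP_eq_length]
  intro s hs; simpa using h s hs

-- ===== B side =====
theorem bfold_spec (B : List String) : ∀ (b : List (List String)),
    (∀ s ∈ B, s.length < b.length) →
    (B.foldl (fun b s => b.set s.length (b.getD s.length [] ++ [s])) b).length = b.length ∧
    ∀ j < b.length,
      (B.foldl (fun b s => b.set s.length (b.getD s.length [] ++ [s])) b).getD j []
        = b.getD j [] ++ bucket B j := by
  induction B with
  | nil => intro b _; simp [bucket]
  | cons s B ih =>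
      intro b hb
      have hl : s.length < b.length := hb s (by simp)
      have hlen : (b.set s.length (b.getD s.length [] ++ [s])).length = b.length := by simp
      obtain ⟨ih1, ih2⟩ := ih (b.set s.length (b.getD s.length [] ++ [s]))
        (by intro t ht; rw [hlen]; exact hb t (by simp [ht]))
      constructor
      · simpa [List.foldl_cons, hlen] using ih1
      · intro j hj
        rw [List.foldl_cons, ih2 j (by omega), bucket_cons]
        by_cases hje : s.length = j
        · subst hje; rw [getD_set_self2 _ _ _ _ hl]; simp
        · rw [getD_set_ne2 _ _ _ _ _ hje]; simp [hje]

theorem foldl_append_flatten : ∀ (L : List (List String)) (acc : List String),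
    L.foldl (fun o b => o ++ b) acc = acc ++ L.flatten := by
  intro L
  induction L with
  | nil => intro acc; simp
  | cons x L ih => intro acc; simp [ih]

theorem getD_replicate {α : Type} (m j : Nat) (d : α) : (List.replicate m d).getD j d = d := by
  simp only [List.getD_eq_getElem?_getD, List.getElem?_replicate]
  split <;> simp

theorem cum_mono (A : List String) : ∀ (b a : Nat), a ≤ b → cum A a ≤ cum A b := by
  intro b
  induction b with
  | zero => intro a h; have : a = 0 := by omega
            subst this; exact le_refl _
  | succ b ih =>
      intro a h
      by_cases hab : a = b + 1
      · subst hab; exact le_refl _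
      · have := ih a (by omega)
        rw [cum]; omega

theorem agetD {α : Type} (a : Array α) (i : Nat) (d : α) : a.getD i d = a.toList.getD i d := by
  simp [Array.getD, List.getD_eq_getElem?_getD]
  split
  · simp_all [Array.length_toList]
  · rename_i h
    rw [Array.getElem?_eq_none (by omega)]
    rfl

theorem toList_loop1 (A : List String) : ∀ (c : Array Int),
    (A.foldl (fun c s => c.setIfInBounds s.length (c.getD s.length 0 + 1)) c).toList
      = A.foldl (fun c s => c.set s.length (c.getD s.length 0 + 1)) c.toList := by
  induction A with
  | nil => intro c; rfl
  | cons s A ih =>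
      intro c
      simp only [List.foldl_cons]
      rw [ih]
      congr 1
      rw [Array.toList_setIfInBounds, agetD]

theorem toList_loop2 : ∀ (js : List Nat) (c : Array Int),
    (js.foldl (fun c i => c.setIfInBounds i (c.getD i 0 + c.getD (i - 1) 0)) c).toList
      = js.foldl (fun c i => c.set i (c.getD i 0 + c.getD (i - 1) 0)) c.toList := by
  intro js
  induction js with
  | nil => intro c; rfl
  | cons j js ih =>
      intro c
      simp only [List.foldl_cons]
      rw [ih]
      congr 1
      rw [Array.toList_setIfInBounds, agetD, agetD]

theorem toList_loop3 : ∀ (L : List String) (st : Array Int × Array String),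
    (((L.foldl (fun (st : Array Int × Array String) s =>
        let c := st.1.setIfInBounds s.length (st.1.getD s.length 0 - 1)
        (c, st.2.setIfInBounds (c.getD s.length 0).toNat s)) st).1).toList,
     ((L.foldl (fun (st : Array Int × Array String) s =>
        let c := st.1.setIfInBounds s.length (st.1.getD s.length 0 - 1)
        (c, st.2.setIfInBounds (c.getD s.length 0).toNat s)) st).2).toList)
      = L.foldl (fun (st : List Int × List String) s =>
          let c := st.1.set s.length (st.1.getD s.length 0 - 1)
          (c, st.2.set (c.getD s.length 0).toNat s)) (st.1.toList, st.2.toList) := by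
  intro L
  induction L with
  | nil => intro st; rfl
  | cons s L ih =>
      intro st
      simp only [List.foldl_cons]
      rw [ih]
      congr 1
      simp only [Array.toList_setIfInBounds]
      rw [agetD, agetD]
      congr 2
      rw [Array.toList_setIfInBounds]

theorem portA_eq_list (A : List String) (max_len : Int) :
    counting_sort_by_length A max_len =
    ((A.reverse).foldl (fun (st : List Int × List String) s =>
        let c := st.1.set s.length (st.1.getD s.length 0 - 1)
        (c, st.2.set (c.getD s.length 0).toNat s))
      ((List.range' 1 ((A.foldl (fun c s => c.set s.length (c.getD s.length 0 + 1))
            (List.replicate max_len.toNat (0 : Int))).length - 1)).foldl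
          (fun c i => c.set i (c.getD i 0 + c.getD (i - 1) 0))
          (A.foldl (fun c s => c.set s.length (c.getD s.length 0 + 1))
            (List.replicate max_len.toNat (0 : Int))),
       List.replicate A.length "")).2 := by
  simp only [counting_sort_by_length]
  have h1 : (A.foldl (fun c s => c.setIfInBounds s.length (c.getD s.length 0 + 1))
      (Array.replicate max_len.toNat (0 : Int))).toList
      = A.foldl (fun c s => c.set s.length (c.getD s.length 0 + 1))
        (List.replicate max_len.toNat (0 : Int)) := by
    rw [toList_loop1, Array.toList_replicate]
  have hsize : (A.foldl (fun c s => c.setIfInBounds s.length (c.getD s.length 0 + 1))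
      (Array.replicate max_len.toNat (0 : Int))).size
      = (A.foldl (fun c s => c.set s.length (c.getD s.length 0 + 1))
        (List.replicate max_len.toNat (0 : Int))).length := by
    rw [← Array.length_toList, h1]
  have h2 : ((List.range' 1 ((A.foldl (fun c s => c.setIfInBounds s.length (c.getD s.length 0 + 1))
        (Array.replicate max_len.toNat (0 : Int))).size - 1)).foldl
        (fun c i => c.setIfInBounds i (c.getD i 0 + c.getD (i - 1) 0))
        (A.foldl (fun c s => c.setIfInBounds s.length (c.getD s.length 0 + 1))
          (Array.replicate max_len.toNat (0 : Int)))).toList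
      = (List.range' 1 ((A.foldl (fun c s => c.set s.length (c.getD s.length 0 + 1))
          (List.replicate max_len.toNat (0 : Int))).length - 1)).foldl
        (fun c i => c.set i (c.getD i 0 + c.getD (i - 1) 0))
        (A.foldl (fun c s => c.set s.length (c.getD s.length 0 + 1))
          (List.replicate max_len.toNat (0 : Int))) := by
    rw [toList_loop2, h1, hsize]
  have h3 := toList_loop3 A.reverse
    ((List.range' 1 ((A.foldl (fun c s => c.setIfInBounds s.length (c.getD s.length 0 + 1))
        (Array.replicate max_len.toNat (0 : Int))).size - 1)).foldl
      (fun c i => c.setIfInBounds i (c.getD i 0 + c.getD (i - 1) 0))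
      (A.foldl (fun c s => c.setIfInBounds s.length (c.getD s.length 0 + 1))
        (Array.replicate max_len.toNat (0 : Int))),
     Array.replicate A.length "")
  have h4 := congrArg Prod.snd h3
  simp only at h4
  rw [h4, h2, Array.toList_replicate]

theorem main_equal (A : List String) (max_len : Int)
    (hlt : ∀ s ∈ A, s.length < max_len.toNat) (hm1 : 1 ≤ max_len.toNat) :
    counting_sort_by_length A max_len = counting_sort_by_length_alt A max_len := by
  rw [portA_eq_list]
  simp only [counting_sort_by_length_alt]
  -- names
  obtain ⟨h1len, h1val⟩ := loop1_spec A (List.replicate max_len.toNat (0 : Int))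
    (by simpa using hlt)
  rw [List.length_replicate] at h1len
  have h1val' : ∀ j < max_len.toNat,
      (A.foldl (fun c s => c.set s.length (c.getD s.length 0 + 1)) (List.replicate max_len.toNat (0 : Int))).getD j 0
        = (cntEq A j : Int) := by
    intro j hj
    rw [h1val j (by simpa using hj), getD_replicate]
    simp
  rw [h1len]
  obtain ⟨h2len, h2val⟩ := loop2_spec A (max_len.toNat - 1) 1
    (A.foldl (fun c s => c.set s.length (c.getD s.length 0 + 1)) (List.replicate max_len.toNat (0 : Int)))
    (le_refl 1) (by omega)
    (by
      intro j hj
      have hj0 : j = 0 := by omega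
      subst hj0
      rw [h1val' 0 hm1]
      simp [cum])
    (by
      intro j _ hj2
      exact h1val' j (by omega))
  rw [List.foldl_reverse]
  have hc2len : (((List.range' 1 (max_len.toNat - 1)).foldl (fun c i => c.set i (c.getD i 0 + c.getD (i - 1) 0))
      (A.foldl (fun c s => c.set s.length (c.getD s.length 0 + 1)) (List.replicate max_len.toNat (0 : Int))))).length
      = max_len.toNat := by rw [h2len, h1len]
  obtain ⟨h3a, h3b, h3⟩ := loop3_spec
    ((List.range' 1 (max_len.toNat - 1)).foldl (fun c i => c.set i (c.getD i 0 + c.getD (i - 1) 0))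
      (A.foldl (fun c s => c.set s.length (c.getD s.length 0 + 1)) (List.replicate max_len.toNat (0 : Int))))
    A (List.replicate A.length "")
    (by intro s hs; rw [hc2len]; exact hlt s hs)
    (by
      intro j hj
      rw [h2val j (by omega), cum]
      push_cast; omega)
    (by
      intro j k hjk hk
      rw [h2val j (by omega), h2val k (by omega)]
      have hmono := cum_mono A k (j+1) (by omega)
      have hck : cum A (k+1) = cum A k + cntEq A k := rfl
      push_cast
      omega)
  rw [show (fun (x : String) (y : List Int × List String) =>
        (fun (st : List Int × List String) (s : String) =>
          let c := st.1.set s.length (st.1.getD s.length 0 - 1);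
          (c, st.2.set (c.getD s.length 0).toNat s)) y x)
      = (fun (s : String) (st : List Int × List String) => place st s) from rfl]
  rw [h3, hc2len, List.range_eq_range']
  rw [writesFor_range_chain A _ max_len.toNat 0 (List.replicate A.length "") (by rw [hc2len]; omega)
    (fun j hj => h2val j (by rw [hc2len] at hj; omega))]
  have hflatlen : (((List.range' 0 max_len.toNat).map (bucket A)).flatten).length = A.length := by
    have h := flatten_map_len A max_len.toNat 0
    rw [Nat.zero_add, cum_all A max_len.toNat hlt] at h
    have hc0 : cum A 0 = 0 := rfl
    omega
  rw [chainWrite_eq _ _ _ (by simp [hflatlen, cum])]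
  have hd : List.drop ((cum A 0) + (((List.range' 0 max_len.toNat).map (bucket A)).flatten).length)
      (List.replicate A.length "") = [] := by
    rw [hflatlen]
    apply List.drop_eq_nil_of_le
    simp [cum]
  rw [hd]
  have hc0 : cum A 0 = 0 := rfl
  rw [hc0]

  simp only [List.take_zero, List.nil_append, List.append_nil]
  -- B side
  obtain ⟨hb1, hb2⟩ := bfold_spec A (List.replicate max_len.toNat []) (by simpa using hlt)
  have hbuckets : A.foldl (fun b s => b.set s.length (b.getD s.length [] ++ [s])) (List.replicate max_len.toNat [])
      = (List.range' 0 max_len.toNat).map (bucket A) := by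
    apply List.ext_getElem
    · rw [hb1]; simp
    · intro i h1 h2
      have hi : i < max_len.toNat := by simpa using h2
      have hv := hb2 i (by simpa using hi)
      rw [getD_replicate, List.nil_append] at hv
      rw [← List.getD_eq_getElem _ [] h1, hv]
      simp [List.getElem_range' ]
  rw [hbuckets, foldl_append_flatten, List.nil_append]


theorem empty_equal (A : List String) (max_len : Int) (hA : A = []) (hm : max_len.toNat = 0) :
    counting_sort_by_length A max_len = counting_sort_by_length_alt A max_len := by
  subst hA
  rw [portA_eq_list]
  simp [counting_sort_by_length_alt, hm]

-- ===== VERDICT (by name: the statement is the Claim_ definition above) =====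
theorem counting_sort_by_length_spec : Claim_equal_counting_sort_by_length := by
  intro A max_len _hdom hpre
  unfold Spec_counting_sort_by_length
  have hlt : ∀ s ∈ A, s.length < max_len.toNat := by
    intro s hs
    have := hpre s hs
    omega
  by_cases hm : max_len.toNat = 0
  · have hA : A = [] := by
      cases A with
      | nil => rfl
      | cons s A => exact absurd (hlt s (by simp)) (by omega)
    exact empty_equal A max_len hA hm
  · exact main_equal A max_len hlt (by omega)
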